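-- pv_equiv track=rewrite | github.com/cheenbabes/distributed-labs | labs/week-49-crdts/services/sync/main.py | merge_pncounter_states
-- ===== SOURCE A (Python) =====
-- from typing import Dict, List, Any, Optional
--
-- def merge_pncounter_states(states: List[Dict[str, Dict[str, int]]]) -> Dict[str, Dict[str, int]]:
--     """Merge multiple PN-Counter states."""
--     merged_p = {}
--     merged_n = {}
--     for state in states:
--         for replica_id, count in state.get("p", {}).items():
--             merged_p[replica_id] = max(merged_p.get(replica_id, 0), count)
--         for replica_id, count in state.get("n", {}).items():
--             merged_n[replica_id] = max(merged_n.get(replica_id, 0), count)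
--     return {"p": merged_p, "n": merged_n}
-- ===== SOURCE B (Python) =====
-- def merge_pncounter_states(states):
--     """Merge multiple PN-Counter states."""
--     def merged(key):
--         ids = dict.fromkeys(r for st in states for r in st.get(key, {}))
--         return {r: max([0] + [st.get(key, {}).get(r, 0) for st in states]) for r in ids}
--     return {"p": merged("p"), "n": merged("n")}
-- ===== Notes on version B (the rewrite author's own statement) =====
-- stated objective: alternative
-- what changed: Instead of accumulating per-replica maxima in mutable dicts in one pass, B first builds the ordered set of replica ids per counter and then computes each merged value by a per-key rescan max(0, values across all states).
import Mathlib
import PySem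

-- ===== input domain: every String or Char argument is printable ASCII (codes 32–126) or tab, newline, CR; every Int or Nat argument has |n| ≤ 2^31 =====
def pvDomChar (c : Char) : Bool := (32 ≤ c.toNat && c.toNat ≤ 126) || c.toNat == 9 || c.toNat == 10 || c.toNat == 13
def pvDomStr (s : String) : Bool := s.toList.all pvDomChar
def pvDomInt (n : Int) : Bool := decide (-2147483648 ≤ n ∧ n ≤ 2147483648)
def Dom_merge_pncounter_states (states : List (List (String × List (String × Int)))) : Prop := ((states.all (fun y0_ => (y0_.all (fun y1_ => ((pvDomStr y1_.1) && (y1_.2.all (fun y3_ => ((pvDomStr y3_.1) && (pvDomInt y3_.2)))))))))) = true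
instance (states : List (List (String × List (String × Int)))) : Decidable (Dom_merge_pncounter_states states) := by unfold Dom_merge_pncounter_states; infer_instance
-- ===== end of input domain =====

-- B replaces A's one-pass accumulation into mutable dicts by first collecting the ordered
-- set of replica ids per counter and then recomputing each merged value by a per-key rescan
-- max(0, values across states); alternative decomposition, same results.

-- st.get(key, {}) as a dict: the state assoc list and the inner assoc list read as Python dicts
-- (Dict.ofList = dict(pairs): last value wins, key keeps its first position)
def pvInner (key : String) (st : List (String × List (String × Int))) : PySem.Dict String Int :=
  PySem.Dict.ofList ((PySem.Dict.ofList st).getD key [])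

-- ===== PORT A =====
def merge_pncounter_states (states : List (List (String × List (String × Int)))) : List (String × List (String × Int)) :=
  let acc := states.foldl
    (fun (acc : PySem.Dict String Int × PySem.Dict String Int) st =>
      (((pvInner "p" st).items).foldl (fun m rc => m.insert rc.1 (max (m.getD rc.1 0) rc.2)) acc.1,
       ((pvInner "n" st).items).foldl (fun m rc => m.insert rc.1 (max (m.getD rc.1 0) rc.2)) acc.2))
    (PySem.Dict.empty, PySem.Dict.empty)
  [("p", acc.1.items), ("n", acc.2.items)]

-- ===== PORT B =====
def pvMergedKey (states : List (List (String × List (String × Int)))) (key : String) : List (String × Int) :=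
  (PySem.Set.ofList (states.flatMap (fun st => (pvInner key st).keys))).map
    (fun r => (r, (states.map (fun st => (pvInner key st).getD r 0)).foldl max 0))

def merge_pncounter_states_alt (states : List (List (String × List (String × Int)))) : List (String × List (String × Int)) :=
  [("p", pvMergedKey states "p"), ("n", pvMergedKey states "n")]

-- ===== PRECONDITION & SPEC =====
def Spec_merge_pncounter_states (states : List (List (String × List (String × Int)))) (out : List (String × List (String × Int))) : Prop := out = merge_pncounter_states_alt states
instance (states : List (List (String × List (String × Int)))) (out : List (String × List (String × Int))) : Decidable (Spec_merge_pncounter_states states out) := by unfold Spec_merge_pncounter_states; infer_instance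

-- ===== CLAIM (what is proved, stated in full; the proofs are below) =====
def Claim_equal_merge_pncounter_states : Prop := ∀ (states : List (List (String × List (String × Int)))), Dom_merge_pncounter_states states → Spec_merge_pncounter_states states (merge_pncounter_states states)

-- ===== LEMMAS AND PROOFS =====

-- A's merge step on one (replica, count) pair
def pvStep (m : PySem.Dict String Int) (rc : String × Int) : PySem.Dict String Int :=
  m.insert rc.1 (max (m.getD rc.1 0) rc.2)

-- running max of the counts recorded for replica r in a flat pair list
def pvGval (r : String) (a : Int) (l : List (String × Int)) : Int :=
  l.foldl (fun a p => if r = p.1 then max a p.2 else a) a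

theorem pv_pair_foldl {α β γ : Type} (f : α → γ → α) (g : β → γ → β) :
    ∀ (l : List γ) (a : α) (b : β),
      l.foldl (fun acc st => (f acc.1 st, g acc.2 st)) (a, b) = (l.foldl f a, l.foldl g b) := by
  intro l
  induction l with
  | nil => intro a b; rfl
  | cons x t ih => intro a b; simp [List.foldl_cons, ih]

theorem pv_nested_flat {α β γ : Type} (f : α → List β) (g : γ → β → γ) :
    ∀ (ds : List α) (init : γ),
      ds.foldl (fun a d => (f d).foldl g a) init = (ds.flatMap f).foldl g init := by
  intro ds
  induction ds with
  | nil => intro init; rfl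
  | cons d t ih => intro init; simp [List.foldl_cons, List.flatMap_cons, List.foldl_append, ih]

theorem pv_getD_foldl_step (r : String) :
    ∀ (l : List (String × Int)) (d : PySem.Dict String Int),
      (l.foldl pvStep d).getD r 0 = pvGval r (d.getD r 0) l := by
  intro l
  induction l with
  | nil => intro d; rfl
  | cons p t ih =>
    intro d
    simp only [List.foldl_cons, pvGval, pvStep, ih]
    by_cases h : r = p.1
    · subst h; simp
    · simp [PySem.Dict.getD_insert, h]

theorem pv_gval_of_not_mem (r : String) :
    ∀ (l : List (String × Int)) (a : Int), r ∉ l.map Prod.fst → pvGval r a l = a := by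
  intro l
  induction l with
  | nil => intro a _; rfl
  | cons p t ih =>
    intro a h
    simp only [List.map_cons, List.mem_cons] at h
    rw [not_or] at h
    simp only [pvGval, List.foldl_cons, if_neg h.1]
    exact ih a h.2

theorem pv_gval_list (r : String) :
    ∀ (l : List (String × Int)) (a : Int), (l.map Prod.fst).Nodup → 0 ≤ a →
      pvGval r a l = max a ((PySem.Dict.mk l).getD r 0) := by
  intro l
  induction l with
  | nil =>
    intro a _ ha
    simp only [pvGval, List.foldl_nil]
    have : (PySem.Dict.mk ([] : List (String × Int))).getD r 0 = 0 := rfl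
    omega
  | cons p t ih =>
    obtain ⟨k, v⟩ := p
    intro a hnd ha
    simp only [List.map_cons, List.nodup_cons] at hnd
    have hget : (PySem.Dict.mk ((k, v) :: t)).getD r 0
        = if k = r then v else (PySem.Dict.mk t).getD r 0 := by
      simp only [PySem.Dict.getD_eq_get?_getD, PySem.Dict.get?_mk_cons, beq_iff_eq]
      by_cases h : k = r <;> simp [h]
    by_cases h : r = k
    · have hnm : r ∉ t.map Prod.fst := h ▸ hnd.1
      simp only [pvGval, List.foldl_cons, if_pos h]
      rw [show t.foldl (fun a p => if r = p.1 then max a p.2 else a) (max a v) = pvGval r (max a v) t from rfl,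
        pv_gval_of_not_mem r t _ hnm, hget, if_pos h.symm]
    · simp only [pvGval, List.foldl_cons, if_neg h]
      rw [show t.foldl (fun a p => if r = p.1 then max a p.2 else a) a = pvGval r a t from rfl,
        ih a hnd.2 ha, hget, if_neg (fun hh => h hh.symm)]

theorem pv_gval_dict (r : String) (d : PySem.Dict String Int) (a : Int)
    (hnd : d.keys.Nodup) (ha : 0 ≤ a) : pvGval r a d.items = max a (d.getD r 0) := by
  have := pv_gval_list r d.items a (by exact hnd) ha
  simpa using this

theorem pv_gval_flat (r : String) :
    ∀ (ds : List (PySem.Dict String Int)), (∀ d ∈ ds, d.keys.Nodup) →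
      ∀ a : Int, 0 ≤ a →
        pvGval r a (ds.flatMap PySem.Dict.items) = ds.foldl (fun a d => max a (d.getD r 0)) a := by
  intro ds
  induction ds with
  | nil => intro _ a _; rfl
  | cons d t ih =>
    intro h a ha
    have h1 : pvGval r a ((d :: t).flatMap PySem.Dict.items)
        = pvGval r (pvGval r a d.items) (t.flatMap PySem.Dict.items) := by
      simp [pvGval, List.flatMap_cons, List.foldl_append]
    rw [h1, pv_gval_dict r d a (h d (List.mem_cons_self)) ha]
    rw [ih (fun x hx => h x (List.mem_cons_of_mem _ hx)) _ (le_trans ha (le_max_left _ _))]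
    rfl

-- the one-key accumulation of A equals B's per-key rescan, as items lists
theorem pv_key_eq (states : List (List (String × List (String × Int)))) (key : String) :
    (states.foldl (fun m st => ((pvInner key st).items).foldl pvStep m) PySem.Dict.empty).items
      = pvMergedKey states key := by
  set D := states.foldl (fun m st => ((pvInner key st).items).foldl pvStep m) PySem.Dict.empty with hD
  have hflat : D = (states.flatMap (fun st => (pvInner key st).items)).foldl pvStep PySem.Dict.empty := by
    rw [hD, pv_nested_flat]
  set ps := states.flatMap (fun st => (pvInner key st).items) with hps
  have hkeys : D.keys = PySem.Set.ofList (ps.map Prod.fst) := by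
    rw [hflat]
    have := PySem.Dict.keys_foldl_insert_key ps Prod.fst
      (fun (d : PySem.Dict String Int) (rc : String × Int) => max (d.getD rc.1 0) rc.2)
      PySem.Dict.empty
    simpa [pvStep, PySem.Set.update_empty] using this
  have hnodup : D.keys.Nodup := by
    rw [hflat]
    exact PySem.Dict.nodup_keys_foldl_insert_key ps Prod.fst _ _ PySem.Dict.nodup_keys_empty
  have hget : ∀ r, D.getD r 0
      = (states.map (fun st => (pvInner key st).getD r 0)).foldl max 0 := by
    intro r
    rw [hflat, pv_getD_foldl_step]
    have h2 : ps = (states.map (fun st => pvInner key st)).flatMap PySem.Dict.items := by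
      simp [hps, List.flatMap_map]
    rw [PySem.Dict.getD_empty, h2,
      pv_gval_flat r _ (by
        intro d hd
        simp only [List.mem_map] at hd
        obtain ⟨st, _, rfl⟩ := hd
        exact PySem.Dict.nodup_keys_ofList _) 0 le_rfl]
    simp [List.foldl_map]
  have hmapfst : ps.map Prod.fst = states.flatMap (fun st => (pvInner key st).keys) := by
    simp [hps, List.map_flatMap, PySem.Dict.keys]
  rw [PySem.Dict.items_eq_map_keys D hnodup 0, hkeys, hmapfst, pvMergedKey]
  apply List.map_congr_left
  intro r _
  rw [hget r]

-- ===== VERDICT (by name: the statement is the Claim_ definition above) =====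
theorem merge_pncounter_states_spec : Claim_equal_merge_pncounter_states := by
  intro states _
  show merge_pncounter_states states = merge_pncounter_states_alt states
  unfold merge_pncounter_states merge_pncounter_states_alt
  rw [show (fun (acc : PySem.Dict String Int × PySem.Dict String Int) st =>
      (((pvInner "p" st).items).foldl (fun m rc => m.insert rc.1 (max (m.getD rc.1 0) rc.2)) acc.1,
       ((pvInner "n" st).items).foldl (fun m rc => m.insert rc.1 (max (m.getD rc.1 0) rc.2)) acc.2))
    = (fun (acc : PySem.Dict String Int × PySem.Dict String Int) st =>
      (((pvInner "p" st).items).foldl pvStep acc.1,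
       ((pvInner "n" st).items).foldl pvStep acc.2)) from rfl,
    pv_pair_foldl (fun m st => ((pvInner "p" st).items).foldl pvStep m)
      (fun m st => ((pvInner "n" st).items).foldl pvStep m) states PySem.Dict.empty PySem.Dict.empty]
  simp only [pv_key_eq]
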